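-- pv_equiv track=rewrite | github.com/Mainorrr/IA-SEARCHING | Ordenar-Colores/ListaAbiertaCerrada.py | es_estado_objetivo
-- ===== SOURCE A (Python) =====
-- from collections import deque, defaultdict
--
-- def es_estado_objetivo(estado):
--     color_conteo = defaultdict(int)
--     colores_encontrados = set()
--     total_fichas = 0
--     columnas_usadas = set()
--
--     for idx, columna in enumerate(estado):
--         if not columna:
--             continue
--
--         #Si alguna ficha de la columna es diferente a la ficha base, hay mezcla; o esta en varias columnas
--         color = columna[0]
--         if any(ficha != color for ficha in columna):
--             return False  # columna con colores mezclados
--         if color in colores_encontrados: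
--             return False  # el color ya apareció en otra columna
--
--         colores_encontrados.add(color)
--         color_conteo[color] = len(columna)
--         total_fichas += len(columna)
--         columnas_usadas.add(idx)
--
--     #Confirmar que no se perdieron o generaron mas fichas
--     if total_fichas != 16:
--         return False
--
--     #Confirmar que no se generaron mas colores
--     if len(color_conteo) != 4:
--         return False
--
--     #Confirmar que cada color tiene 4 fichas
--     if any(cant != 4 for cant in color_conteo.values()):
--         return False
--
--     #Si no falla antes, es una solucion.
--     return True
-- ===== SOURCE B (Python) =====
-- def es_estado_objetivo(estado):
--     cols = [c for c in estado if c]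
--     if len(cols) != 4:
--         return False
--     if any(any(f != c[0] for f in c) for c in cols):
--         return False
--     if any(len(c) != 4 for c in cols):
--         return False
--     return len({c[0] for c in cols}) == 4
-- ===== Notes on version B (the rewrite author's own statement) =====
-- stated objective: simpler
-- what changed: B drops A's running state (color-count dict, seen-color set, running total, used-column set) and instead filters the non-empty columns once, then checks aggregate predicates on that list: 4 columns, all monochromatic, each of length 4, 4 distinct base colors.
import Mathlib
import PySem

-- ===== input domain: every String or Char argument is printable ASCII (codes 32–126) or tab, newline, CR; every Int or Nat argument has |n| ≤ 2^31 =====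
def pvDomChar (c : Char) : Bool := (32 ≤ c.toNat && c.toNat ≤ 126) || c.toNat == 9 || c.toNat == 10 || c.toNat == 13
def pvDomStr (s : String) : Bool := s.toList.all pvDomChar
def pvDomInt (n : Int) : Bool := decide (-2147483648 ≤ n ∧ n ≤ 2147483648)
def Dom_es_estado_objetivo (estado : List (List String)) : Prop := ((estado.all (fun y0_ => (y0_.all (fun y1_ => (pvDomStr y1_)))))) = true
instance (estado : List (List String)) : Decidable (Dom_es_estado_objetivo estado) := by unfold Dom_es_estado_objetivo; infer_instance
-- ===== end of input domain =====

-- B replaces A's running counters (dict of color counts, set of seen colors, running total,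
-- set of used column indices) by one filter of the non-empty columns followed by aggregate
-- checks on that list; objective: simpler.

-- ===== PORT A =====
-- Literal port of A's loop over enumerate(estado): state = (color_conteo, colores_encontrados,
-- total_fichas, columnas_usadas); early 'return False' becomes returning false from the recursion.
def esLoopA (l : List (Int × List String)) (conteo : PySem.Dict String Int)
    (colores : PySem.Set String) (total : Int) (usadas : PySem.Set Int) : Bool :=
  match l with
  | [] =>
      -- the checks after the loop
      if total ≠ 16 then false
      else if (conteo.size : Int) ≠ 4 then false
      else if conteo.values.any (fun cant => decide (cant ≠ 4)) then false
      else true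
  | (idx, columna) :: rest =>
      match columna with
      | [] => esLoopA rest conteo colores total usadas   -- 'if not columna: continue'
      | color :: resto =>                                 -- color = columna[0] (columna nonempty)
          if (color :: resto).any (fun ficha => decide (ficha ≠ color)) then false
          else if colores.contains color then false
          else esLoopA rest (conteo.insert color ((color :: resto).length : Int))
                (colores.add color) (total + ((color :: resto).length : Int))
                (usadas.add idx)

def es_estado_objetivo (estado : List (List String)) : Bool :=
  esLoopA (PySem.List.enumerate estado) PySem.Dict.empty PySem.Set.empty 0 PySem.Set.empty

-- ===== PORT B =====
-- c[0] on a column of cols is ported as c.headD "" — exact, every c in cols is non-empty.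
def es_estado_objetivo_alt (estado : List (List String)) : Bool :=
  let cols := estado.filter (fun c => !c.isEmpty)
  if (cols.length : Int) ≠ 4 then false
  else if cols.any (fun c => c.any (fun f => decide (f ≠ c.headD ""))) then false
  else if cols.any (fun c => decide ((c.length : Int) ≠ 4)) then false
  else decide (((PySem.Set.ofList (cols.map (fun c => c.headD ""))).length : Int) = 4)

-- ===== PRECONDITION & SPEC =====
def Spec_es_estado_objetivo (estado : List (List String)) (out : Bool) : Prop := out = es_estado_objetivo_alt estado
instance (estado : List (List String)) (out : Bool) : Decidable (Spec_es_estado_objetivo estado out) := by unfold Spec_es_estado_objetivo; infer_instance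

-- ===== CLAIM (what is proved, stated in full; the proofs are below) =====
def Claim_equal_es_estado_objetivo : Prop := ∀ (estado : List (List String)), Dom_es_estado_objetivo estado → Spec_es_estado_objetivo estado (es_estado_objetivo estado)

-- ===== LEMMAS AND PROOFS =====

-- the non-empty columns of the (still unprocessed) enumerated suffix
def pvCols (xs : List (Int × List String)) : List (List String) :=
  (xs.map Prod.snd).filter (fun c => !c.isEmpty)


theorem esLoopA_true_iff (xs : List (Int × List String)) (pairs : List (String × Int))
    (total : Int) (usadas : PySem.Set Int) (hnd : (pairs.map Prod.fst).Nodup) :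
    (esLoopA xs ⟨pairs⟩ (pairs.map Prod.fst) total usadas = true ↔
      ((∀ c ∈ pvCols xs, ∀ f ∈ c, f = c.headD "") ∧
       ((pvCols xs).map (fun c => c.headD "")).Nodup ∧
       (∀ h ∈ (pvCols xs).map (fun c => c.headD ""), h ∉ pairs.map Prod.fst) ∧
       total + ((pvCols xs).map (fun c => (c.length : Int))).sum = 16 ∧
       pairs.length + (pvCols xs).length = 4 ∧
       (∀ v ∈ pairs.map Prod.snd, v = 4) ∧
       (∀ c ∈ pvCols xs, (c.length : Int) = 4))) := by
  induction xs generalizing pairs total usadas with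
  | nil =>
      have hsize : (PySem.Dict.mk pairs).size = pairs.length := rfl
      simp only [esLoopA, pvCols, List.map_nil, List.filter_nil, List.sum_nil, List.length_nil,
        hsize, PySem.Dict.values_mk, List.not_mem_nil]
      split_ifs with h1 h2 h3
      · simp only [false_iff]
        rintro ⟨-, -, -, h16, -⟩
        exact h1 (by omega)
      · simp only [false_iff]
        rintro ⟨-, -, -, -, h4, -⟩
        exact h2 (by omega)
      · simp only [false_iff]
        rintro ⟨-, -, -, -, -, hvals, -⟩
        rw [List.any_eq_true] at h3
        obtain ⟨v, hv, hne⟩ := h3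
        simp only [decide_eq_true_eq] at hne
        exact hne (hvals v hv)
      · simp only [Bool.not_eq_true, List.any_eq_false, decide_eq_true_eq, not_not] at h3
        refine iff_of_true rfl ⟨by simp, by simp, by simp, by omega, by omega, ?_, by simp⟩
        intro v hv; exact h3 v hv
  | cons p rest ih =>
      obtain ⟨idx, columna⟩ := p
      match columna with
      | [] =>
          have hcols : pvCols ((idx, ([] : List String)) :: rest) = pvCols rest := by
            simp [pvCols]
          rw [show esLoopA ((idx, ([] : List String)) :: rest) ⟨pairs⟩ (pairs.map Prod.fst) total usadas
                = esLoopA rest ⟨pairs⟩ (pairs.map Prod.fst) total usadas from rfl, hcols]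
          exact ih pairs total usadas hnd
      | color :: tl =>
          have hcols : pvCols ((idx, color :: tl) :: rest) = (color :: tl) :: pvCols rest := by
            simp [pvCols]
          rw [hcols]
          simp only [esLoopA]
          by_cases h1 : ∃ f ∈ color :: tl, f ≠ color
          · rw [if_pos (by simp only [List.any_eq_true, decide_eq_true_eq]; exact h1)]
            simp only [Bool.false_eq_true, false_iff]
            rintro ⟨hmono, -⟩
            obtain ⟨f, hf, hne⟩ := h1
            have := hmono _ (List.mem_cons_self ..) f hf
            rw [List.headD_cons] at this
            exact hne this
          · have hall : ∀ f ∈ color :: tl, f = color := by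
              intro f hf; by_contra hne; exact h1 ⟨f, hf, hne⟩
            rw [if_neg (by simp only [List.any_eq_true, decide_eq_true_eq]; exact h1)]
            by_cases h2 : color ∈ pairs.map Prod.fst
            · rw [if_pos (by rw [PySem.Set.contains_iff]; exact h2)]
              simp only [Bool.false_eq_true, false_iff]
              rintro ⟨-, -, hdisj, -⟩
              exact hdisj color (by simp) h2
            · have hc : PySem.Set.contains (pairs.map Prod.fst) color = false := by
                rw [← Bool.not_eq_true, PySem.Set.contains_iff]; exact h2
              have hdc : (PySem.Dict.mk pairs).contains color = false := by
                rw [PySem.Dict.contains_eq_decide_mem_keys, PySem.Dict.keys_mk]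
                simpa using h2
              rw [if_neg (by rw [hc]; simp)]
              have hins : (PySem.Dict.mk pairs).insert color (((color :: tl).length : Int))
                  = ⟨pairs ++ [(color, ((color :: tl).length : Int))]⟩ := by
                apply PySem.Dict.ext
                simpa using PySem.Dict.items_insert_of_not_contains ⟨pairs⟩ _ hdc
              have hadd : PySem.Set.add (pairs.map Prod.fst) color
                  = (pairs ++ [(color, ((color :: tl).length : Int))]).map Prod.fst := by
                rw [PySem.Set.add_of_not_mem h2]; simp
              rw [hins, hadd]
              have hnd' : ((pairs ++ [(color, ((color :: tl).length : Int))]).map Prod.fst).Nodup := by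
                rw [List.map_append]
                simp only [List.map_cons, List.map_nil, List.nodup_append, List.nodup_cons,
                  List.nodup_nil, List.not_mem_nil, not_false_iff, and_true, true_and]
                refine ⟨hnd, ?_⟩
                intro a ha b hb
                have hb' : b = color := by simpa using hb
                subst hb'
                intro heq; subst heq; exact h2 ha
              rw [ih _ _ _ hnd']
              simp only [List.map_append, List.map_cons, List.map_nil, List.headD_cons,
                List.length_append, List.length_cons, List.length_nil, List.sum_cons]
              constructor
              · rintro ⟨c1, c2, c3, c4, c5, c6, c7⟩
                refine ⟨?_, ?_, ?_, by push_cast at c4 ⊢; omega, by omega, ?_, ?_⟩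
                · intro c hcm
                  rcases List.mem_cons.mp hcm with rfl | hcm
                  · intro f hf; rw [List.headD_cons]; exact hall f hf
                  · exact c1 c hcm
                · refine List.nodup_cons.mpr ⟨?_, c2⟩
                  intro hmem
                  exact (c3 _ hmem) (by simp)
                · intro h hmem
                  rcases List.mem_cons.mp hmem with rfl | hmem
                  · exact h2
                  · intro hp; exact c3 h hmem (List.mem_append_left _ hp)
                · intro v hv; exact c6 v (List.mem_append_left _ hv)
                · intro c hcm
                  rcases List.mem_cons.mp hcm with rfl | hcm
                  · exact c6 _ (List.mem_append_right _ (by simp))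
                  · exact c7 c hcm
              · rintro ⟨g1, g2, g3, g4, g5, g6, g7⟩
                obtain ⟨hnotin, g2'⟩ := List.nodup_cons.mp g2
                have hlen4 : ((color :: tl).length : Int) = 4 :=
                  g7 _ (List.mem_cons_self ..)
                refine ⟨?_, g2', ?_, by push_cast at g4 hlen4 ⊢; omega, by omega, ?_, ?_⟩
                · intro c hcm; exact g1 c (List.mem_cons_of_mem _ hcm)
                · intro h hmem hp
                  rcases List.mem_append.mp hp with hp | hp
                  · exact g3 h (List.mem_cons_of_mem _ hmem) hp
                  · simp only [List.mem_cons, List.not_mem_nil, or_false] at hp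
                    subst hp; exact hnotin hmem
                · intro v hv
                  rcases List.mem_append.mp hv with hv | hv
                  · exact g6 v hv
                  · simp only [List.mem_cons, List.not_mem_nil, or_false] at hv
                    subst hv; exact hlen4
                · intro c hcm; exact g7 c (List.mem_cons_of_mem _ hcm)


theorem enumerate_map_snd (xs : List (List String)) (n : Int) :
    (PySem.List.enumerate xs n).map Prod.snd = xs := by
  induction xs generalizing n with
  | nil => rfl
  | cons x xs ih => simp [PySem.List.enumerate, ih]

theorem nodup_of_length_ofList (xs : List String)
    (h : (PySem.Set.ofList xs).length = xs.length) : xs.Nodup := by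
  induction xs with
  | nil => exact List.nodup_nil
  | cons x xs ih =>
      rw [PySem.Set.ofList_cons] at h
      simp only [List.length_cons] at h
      have hle1 : ((PySem.Set.ofList xs).discard x).length ≤ (PySem.Set.ofList xs).length :=
        List.length_filter_le _ _
      have hle2 := PySem.Set.length_ofList_le xs
      have hx : x ∉ PySem.Set.ofList xs := by
        intro hmem
        have : ((PySem.Set.ofList xs).discard x).length < (PySem.Set.ofList xs).length := by
          apply List.length_filter_lt_length_iff_exists.mpr
          exact ⟨x, hmem, by simp⟩
        omega
      exact List.nodup_cons.mpr ⟨fun hm => hx ((PySem.Set.mem_ofList xs x).mpr hm),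
        ih (by omega)⟩

theorem sum_of_all_four (l : List Int) (h : ∀ x ∈ l, x = 4) : l.sum = 4 * l.length := by
  induction l with
  | nil => simp
  | cons x t ih =>
      have hx := h x (List.mem_cons_self ..)
      have := ih (fun y hy => h y (List.mem_cons_of_mem _ hy))
      simp [this, hx]; ring

theorem es_estado_objetivo_eq_alt (estado : List (List String)) :
    es_estado_objetivo estado = es_estado_objetivo_alt estado := by
  rw [Bool.eq_iff_iff]
  have hA := esLoopA_true_iff (PySem.List.enumerate estado) [] 0 PySem.Set.empty (by simp)
  have hcols : pvCols (PySem.List.enumerate estado) = estado.filter (fun c => !c.isEmpty) := by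
    rw [pvCols, enumerate_map_snd]
  rw [hcols] at hA
  simp only [List.map_nil, List.length_nil, List.not_mem_nil, not_false_iff, implies_true,
    true_and, zero_add] at hA
  rw [show es_estado_objetivo estado
        = esLoopA (PySem.List.enumerate estado) ⟨[]⟩ (([] : List (String × Int)).map Prod.fst) 0 PySem.Set.empty from rfl]
  simp only [List.map_nil]
  rw [hA]
  have hB : es_estado_objetivo_alt estado = true ↔
      (((estado.filter (fun c => !c.isEmpty)).length : Int) = 4 ∧
       (∀ c ∈ estado.filter (fun c => !c.isEmpty), ∀ f ∈ c, f = c.headD "") ∧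
       (∀ c ∈ estado.filter (fun c => !c.isEmpty), (c.length : Int) = 4) ∧
       (((PySem.Set.ofList ((estado.filter (fun c => !c.isEmpty)).map (fun c => c.headD ""))).length : Int) = 4)) := by
    simp only [es_estado_objetivo_alt]
    split_ifs with b1 b2 b3
    · simp only [false_iff]
      rintro ⟨h4, -⟩; exact b1 h4
    · simp only [false_iff]
      rintro ⟨-, hm, -⟩
      rw [List.any_eq_true] at b2
      obtain ⟨c, hc, hf⟩ := b2
      rw [List.any_eq_true] at hf
      obtain ⟨f, hfm, hne⟩ := hf
      simp only [decide_eq_true_eq] at hne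
      exact hne (hm c hc f hfm)
    · simp only [false_iff]
      rintro ⟨-, -, hl, -⟩
      rw [List.any_eq_true] at b3
      obtain ⟨c, hc, hne⟩ := b3
      simp only [decide_eq_true_eq] at hne
      exact hne (hl c hc)
    · simp only [decide_eq_true_eq]
      constructor
      · intro hd4
        refine ⟨by omega, ?_, ?_, hd4⟩
        · intro c hc f hf
          by_contra hne
          exact b2 (List.any_eq_true.mpr ⟨c, hc, List.any_eq_true.mpr ⟨f, hf, by simpa using hne⟩⟩)
        · intro c hc
          by_contra hne
          exact b3 (List.any_eq_true.mpr ⟨c, hc, by simpa using hne⟩)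
      · rintro ⟨-, -, -, hd4⟩; exact hd4
  rw [hB]
  constructor
  · rintro ⟨hmono, hnd, h16, h4, -, hlens⟩
    refine ⟨by omega, hmono, hlens, ?_⟩
    rw [PySem.Set.ofList_eq_self_of_nodup _ hnd, List.length_map]
    omega
  · rintro ⟨h4, hmono, hlens, hset4⟩
    have hlenheads : ((estado.filter (fun c => !c.isEmpty)).map (fun c => c.headD "")).length
        = (estado.filter (fun c => !c.isEmpty)).length := List.length_map ..
    have hnd : ((estado.filter (fun c => !c.isEmpty)).map (fun c => c.headD "")).Nodup := by
      apply nodup_of_length_ofList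
      omega
    refine ⟨hmono, hnd, ?_, by omega, ⟨by simp, hlens⟩⟩
    have hall : ∀ x ∈ (estado.filter (fun c => !c.isEmpty)).map (fun c => (c.length : Int)), x = 4 := by
      intro x hx
      obtain ⟨c, hc, rfl⟩ := List.mem_map.mp hx
      exact hlens c hc
    rw [sum_of_all_four _ hall, List.length_map]
    omega

-- ===== VERDICT (by name: the statement is the Claim_ definition above) =====
theorem es_estado_objetivo_spec : Claim_equal_es_estado_objetivo := by
  intro estado _
  exact es_estado_objetivo_eq_alt estado
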